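-- pv_equiv track=rewrite | github.com/magedus/python-11 | quzhenji/week8/W8_calcu_twonum.py | cal_num1_num2
-- ===== SOURCE A (Python) =====
-- def cal_num1_num2(sum,srclst):
--     lst = []
--     for i in range(len(srclst) - 1):
--         x = srclst[i]
--         for j in range(i + 1, len(srclst)):
--             y = srclst[j]
--             if sum == x + y:
--                 lst.append((x,y))
--
--     return lst
-- ===== SOURCE B (Python) =====
-- def cal_num1_num2(sum, srclst):
--     # Index the list once: value -> ascending list of positions.
--     idx = {}
--     for i, x in enumerate(srclst):
--         idx[x] = idx.get(x, []) + [i]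
--     out = []
--     for i, x in enumerate(srclst):
--         c = sum - x
--         for j in idx.get(c, []):
--             if j > i:
--                 out.append((x, c))
--     return out
-- ===== Notes on version B (the rewrite author's own statement) =====
-- stated objective: faster
-- what changed: Replaces the inner linear scan over all later elements by a one-pass hash index from value to its ascending positions, then emits (x, sum-x) for each indexed position of the complement beyond i, preserving A's i-major order.
import Mathlib
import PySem

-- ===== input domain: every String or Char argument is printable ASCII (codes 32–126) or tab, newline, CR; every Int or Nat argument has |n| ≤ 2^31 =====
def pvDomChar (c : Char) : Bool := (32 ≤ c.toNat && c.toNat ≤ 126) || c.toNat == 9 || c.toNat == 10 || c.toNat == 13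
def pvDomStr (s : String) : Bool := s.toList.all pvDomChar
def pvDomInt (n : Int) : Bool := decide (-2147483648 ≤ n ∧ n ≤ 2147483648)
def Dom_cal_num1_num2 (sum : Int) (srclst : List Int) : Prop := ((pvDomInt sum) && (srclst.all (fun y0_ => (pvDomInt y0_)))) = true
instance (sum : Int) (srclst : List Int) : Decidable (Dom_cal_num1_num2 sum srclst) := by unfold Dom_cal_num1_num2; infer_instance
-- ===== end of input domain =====

-- B replaces A's quadratic double scan by a value→positions index built in one pass; same return value, same order.

-- ===== PORT A =====
def cal_num1_num2 (sum : Int) (srclst : List Int) : List (Int × Int) :=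
  (PySem.List.pyRange 0 ((srclst.length : Int) - 1) 1).foldl (fun lst i =>
    let x := PySem.List.pyGetD srclst i 0
    (PySem.List.pyRange (i + 1) (srclst.length : Int) 1).foldl (fun lst j =>
      let y := PySem.List.pyGetD srclst j 0
      if sum == x + y then lst ++ [(x, y)] else lst) lst) []

-- ===== PORT B =====
def cal_num1_num2_alt (sum : Int) (srclst : List Int) : List (Int × Int) :=
  let idx : PySem.Dict Int (List Int) :=
    (PySem.List.enumerate srclst 0).foldl (fun d p => d.modify p.2 [] (· ++ [p.1])) PySem.Dict.empty
  (PySem.List.enumerate srclst 0).foldl (fun out p =>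
    let c := sum - p.2
    (idx.getD c []).foldl (fun out j => if j > p.1 then out ++ [(p.2, c)] else out) out) []

-- ===== PRECONDITION & SPEC =====
def Spec_cal_num1_num2 (sum : Int) (srclst : List Int) (out : List (Int × Int)) : Prop := out = cal_num1_num2_alt sum srclst
instance (sum : Int) (srclst : List Int) (out : List (Int × Int)) : Decidable (Spec_cal_num1_num2 sum srclst out) := by unfold Spec_cal_num1_num2; infer_instance

-- ===== CLAIM (what is proved, stated in full; the proofs are below) =====
def Claim_equal_cal_num1_num2 : Prop := ∀ (sum : Int) (srclst : List Int), Dom_cal_num1_num2 sum srclst → Spec_cal_num1_num2 sum srclst (cal_num1_num2 sum srclst)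

-- ===== LEMMAS AND PROOFS =====

lemma hA (sum : Int) (srclst : List Int) :
    cal_num1_num2 sum srclst
    = (PySem.List.pyRange 0 ((srclst.length : Int) - 1) 1).flatMap (fun i =>
        ((PySem.List.pyRange (i + 1) (srclst.length : Int) 1).filter
          (fun j => sum == PySem.List.pyGetD srclst i 0 + PySem.List.pyGetD srclst j 0)).map
          (fun j => (PySem.List.pyGetD srclst i 0, PySem.List.pyGetD srclst j 0))) := by
  unfold cal_num1_num2
  simp only [PySem.List.foldl_append_if, PySem.List.foldl_append_eq_flatMap, List.nil_append]

lemma idx_getD (srclst : List Int) (c : Int) :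
    ((PySem.List.enumerate srclst 0).foldl (fun d p => d.modify p.2 [] (· ++ [p.1])) PySem.Dict.empty).getD c []
    = (PySem.List.pyRange 0 (srclst.length : Int) 1).filter
        (fun j => PySem.List.pyGetD srclst j 0 == c) := by
  have h1 : (PySem.List.enumerate srclst 0).foldl (fun d p => d.modify p.2 [] (· ++ [p.1])) PySem.Dict.empty
      = ((PySem.List.enumerate srclst 0).map Prod.swap).foldl
          (fun d q => d.modify q.1 [] (· ++ [q.2])) PySem.Dict.empty := by
    rw [List.foldl_map]; rfl
  rw [h1, PySem.Dict.getD_foldl_modify_append,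
    PySem.List.enumerate_eq_map_pyRange srclst 0]
  simp [List.filter_map, List.map_map, Function.comp_def]

lemma hB (sum : Int) (srclst : List Int) :
    cal_num1_num2_alt sum srclst
    = (PySem.List.pyRange 0 (srclst.length : Int) 1).flatMap (fun i =>
        (((PySem.List.pyRange 0 (srclst.length : Int) 1).filter
            (fun j => PySem.List.pyGetD srclst j 0 == sum - PySem.List.pyGetD srclst i 0)).filter
            (fun j => decide (j > i))).map
            (fun _ => (PySem.List.pyGetD srclst i 0, sum - PySem.List.pyGetD srclst i 0))) := by
  unfold cal_num1_num2_alt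
  simp only [idx_getD]
  rw [PySem.List.enumerate_eq_map_pyRange srclst 0]
  simp only [PySem.List.len_eq, List.foldl_map, PySem.List.foldl_append_ite,
    PySem.List.foldl_append_eq_flatMap, List.nil_append]

lemma block_eq (sum : Int) (srclst : List Int) (i : Int) (h0 : 0 ≤ i) (hn : i < (srclst.length : Int)) :
    (((PySem.List.pyRange 0 (srclst.length : Int) 1).filter
        (fun j => PySem.List.pyGetD srclst j 0 == sum - PySem.List.pyGetD srclst i 0)).filter
        (fun j => decide (j > i))).map
        (fun _ => (PySem.List.pyGetD srclst i 0, sum - PySem.List.pyGetD srclst i 0))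
    = ((PySem.List.pyRange (i + 1) (srclst.length : Int) 1).filter
        (fun j => sum == PySem.List.pyGetD srclst i 0 + PySem.List.pyGetD srclst j 0)).map
        (fun j => (PySem.List.pyGetD srclst i 0, PySem.List.pyGetD srclst j 0)) := by
  rw [List.filter_filter]
  have hsplit : PySem.List.pyRange 0 (srclst.length : Int) 1
      = PySem.List.pyRange 0 (i+1) 1 ++ PySem.List.pyRange (i+1) (srclst.length : Int) 1 :=
    PySem.List.pyRange_one_append 0 (i+1) _ (by omega) (by omega)
  rw [hsplit, List.filter_append]
  have hnil : (PySem.List.pyRange 0 (i+1) 1).filter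
      (fun j => decide (j > i) && (PySem.List.pyGetD srclst j 0 == sum - PySem.List.pyGetD srclst i 0)) = [] := by
    rw [List.filter_eq_nil_iff]
    intro j hj
    rw [PySem.List.mem_pyRange_one] at hj
    simp only [Bool.and_eq_true, decide_eq_true_eq]
    omega
  rw [hnil, List.nil_append]
  have hfeq : (PySem.List.pyRange (i+1) (srclst.length : Int) 1).filter
      (fun j => decide (j > i) && (PySem.List.pyGetD srclst j 0 == sum - PySem.List.pyGetD srclst i 0))
      = (PySem.List.pyRange (i+1) (srclst.length : Int) 1).filter
      (fun j => sum == PySem.List.pyGetD srclst i 0 + PySem.List.pyGetD srclst j 0) := by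
    apply List.filter_congr
    intro j hj
    rw [PySem.List.mem_pyRange_one] at hj
    rw [Bool.eq_iff_iff]
    simp only [Bool.and_eq_true, decide_eq_true_eq, beq_iff_eq]
    omega
  rw [hfeq]
  apply List.map_congr_left
  intro j hj
  rw [List.mem_filter] at hj
  have := hj.2
  simp only [beq_iff_eq] at this
  simp only [this]
  congr 1
  omega

lemma flatMap_final {α : Type} (f g : Int → List α) (n : Int)
    (hfg : ∀ i, 0 ≤ i → i < n → f i = g i)
    (hg : 1 ≤ n → g (n - 1) = []) :
    (PySem.List.pyRange 0 (n - 1) 1).flatMap f = (PySem.List.pyRange 0 n 1).flatMap g := by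
  by_cases h1 : 1 ≤ n
  · have hsplit : PySem.List.pyRange 0 n 1
        = PySem.List.pyRange 0 (n - 1) 1 ++ [n - 1] := by
      have h := PySem.List.pyRange_one_succ_right (a := 0) (b := n - 1) (by omega)
      rw [show n - 1 + 1 = n by omega] at h
      exact h
    rw [hsplit, List.flatMap_append, List.flatMap_singleton, hg h1, List.append_nil]
    simp only [List.flatMap_def]
    congr 1
    apply List.map_congr_left
    intro i hi
    rw [PySem.List.mem_pyRange_one] at hi
    exact hfg i hi.1 (by omega)
  · rw [PySem.List.pyRange_one_eq_nil (show n - 1 ≤ 0 by omega),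
      PySem.List.pyRange_one_eq_nil (show n ≤ 0 by omega)]
    simp

lemma main_eq (sum : Int) (srclst : List Int) :
    cal_num1_num2 sum srclst = cal_num1_num2_alt sum srclst := by
  rw [hA, hB]
  apply flatMap_final
  · intro i h0 hn
    exact (block_eq sum srclst i h0 hn).symm
  · intro h1
    rw [show ((((PySem.List.pyRange 0 (srclst.length : Int) 1).filter
        (fun j => PySem.List.pyGetD srclst j 0 == sum - PySem.List.pyGetD srclst ((srclst.length : Int) - 1) 0)).filter
        (fun j => decide (j > (srclst.length : Int) - 1)))) = [] from ?_, List.map_nil]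
    rw [List.filter_eq_nil_iff]
    intro j hj
    rw [List.mem_filter, PySem.List.mem_pyRange_one] at hj
    simp only [decide_eq_true_eq]
    omega

-- ===== VERDICT (by name: the statement is the Claim_ definition above) =====
theorem cal_num1_num2_spec : Claim_equal_cal_num1_num2 := by
  intro sum srclst _
  exact (main_eq sum srclst)
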